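-- pv_equiv track=rewrite | github.com/GuavaLand/IntroToCS | L8_daysBetweenTwoDate.py | daysOfMon
-- ===== SOURCE A (Python) =====
-- daysOfMonths = [ 31, 28, 31, 30, 31, 30, 31, 31, 30, 31, 30, 31]
--
-- daysOfMonths_leap = [ 31, 29, 31, 30, 31, 30, 31, 31, 30, 31, 30, 31]
--
-- def daysOfMon(year1, month1, day1, year2, month2, day2): #days of months in between
--     mdays = 0
--     if year2 > year1:
--         for i in range(month1 + 1, 13):
--             if isLeap(year1):
--                 mdays += daysOfMonths_leap[i-1]
--             else:
--                 mdays += daysOfMonths[i-1]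
--         for i in range(1, month2):
--             if isLeap(year2):
--                 mdays += daysOfMonths_leap[i-1]
--             else:
--                 mdays += daysOfMonths[i-1]
--     else: #same year
--         if month2 > month1:
--             for i in range(month1 + 1, month2):
--                 if isLeap(year1):
--                     mdays += daysOfMonths_leap[i-1]
--                 else:
--                     mdays += daysOfMonths[i-1]
--     return mdays
--
-- def isLeap(year):
--     if year % 4 != 0:
--         return False
--     elif year % 100 != 0:
--         return True
--     elif year % 400 != 0:
--         return False
--     else:
--         return True
-- ===== SOURCE B (Python) =====
-- PREFIX = [0, 31, 59, 90, 120, 151, 181, 212, 243, 273, 304, 334, 365]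
-- PREFIX_LEAP = [0, 31, 60, 91, 121, 152, 182, 213, 244, 274, 305, 335, 366]
--
-- def isLeap(year):
--     return year % 4 == 0 and (year % 100 != 0 or year % 400 == 0)
--
-- def daysOfMon(year1, month1, day1, year2, month2, day2):
--     p1 = PREFIX_LEAP if isLeap(year1) else PREFIX
--     if year2 > year1:
--         p2 = PREFIX_LEAP if isLeap(year2) else PREFIX
--         return (p1[12] - p1[month1]) + p2[month2 - 1]
--     if month2 > month1:
--         return p1[month2 - 1] - p1[month1]
--     return 0
-- ===== Notes on version B (the rewrite author's own statement) =====
-- stated objective: alternative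
-- what changed: Replaces the four per-month summing loops over day-count tables with O(1) lookups into precomputed cumulative (prefix-sum) month tables, keeping the same outer branch structure.
-- outside the precondition, e.g. on daysOfMon(2000, 13, 1, 2001, 1, 1): A returns 0, B raises IndexError; on daysOfMon(2000, -3, 1, 2000, 2, 1): A returns 123, B returns -274
import Mathlib
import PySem

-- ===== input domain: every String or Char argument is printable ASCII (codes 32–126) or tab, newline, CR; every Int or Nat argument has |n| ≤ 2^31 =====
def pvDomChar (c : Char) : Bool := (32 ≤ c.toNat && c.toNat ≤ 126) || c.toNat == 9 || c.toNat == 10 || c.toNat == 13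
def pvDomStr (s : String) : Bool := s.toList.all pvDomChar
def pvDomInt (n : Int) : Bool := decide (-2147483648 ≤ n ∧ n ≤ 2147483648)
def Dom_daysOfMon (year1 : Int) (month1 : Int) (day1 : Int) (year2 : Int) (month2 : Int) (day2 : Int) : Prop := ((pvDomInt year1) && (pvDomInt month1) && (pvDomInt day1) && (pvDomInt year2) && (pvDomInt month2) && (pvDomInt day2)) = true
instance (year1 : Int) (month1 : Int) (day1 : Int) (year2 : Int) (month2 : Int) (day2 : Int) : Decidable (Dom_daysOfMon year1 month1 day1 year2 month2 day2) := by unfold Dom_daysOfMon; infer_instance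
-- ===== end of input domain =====

-- B replaces A's four month-summing loops by O(1) lookups in precomputed prefix-sum tables,
-- keeping the same branch structure (objective: alternative, same cost at this fixed size).

-- ===== PORT A =====
def pyDaysOfMonths : List Int := [31, 28, 31, 30, 31, 30, 31, 31, 30, 31, 30, 31]
def pyDaysOfMonthsLeap : List Int := [31, 29, 31, 30, 31, 30, 31, 31, 30, 31, 30, 31]

def isLeapA (year : Int) : Bool :=
  if PySem.Int.mod year 4 ≠ 0 then false
  else if PySem.Int.mod year 100 ≠ 0 then true
  else if PySem.Int.mod year 400 ≠ 0 then false
  else true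

-- one loop-body step of A: mdays += daysOfMonths[_leap][i-1]
-- (pyGetD's default 0 never fires on inputs admitted by Pre_: indices stay in range there)
def monStepA (year : Int) (mdays : Int) (i : Int) : Int :=
  if isLeapA year then mdays + PySem.List.pyGetD pyDaysOfMonthsLeap (i - 1) 0
  else mdays + PySem.List.pyGetD pyDaysOfMonths (i - 1) 0

def daysOfMon (year1 : Int) (month1 : Int) (day1 : Int) (year2 : Int) (month2 : Int) (day2 : Int) : Int :=
  let mdays : Int := 0
  if year2 > year1 then
    let mdays := (PySem.List.pyRange (month1 + 1) 13 1).foldl (monStepA year1) mdays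
    (PySem.List.pyRange 1 month2 1).foldl (monStepA year2) mdays
  else
    if month2 > month1 then
      (PySem.List.pyRange (month1 + 1) month2 1).foldl (monStepA year1) mdays
    else mdays

-- ===== PORT B =====
def prefixDays : List Int := [0, 31, 59, 90, 120, 151, 181, 212, 243, 273, 304, 334, 365]
def prefixDaysLeap : List Int := [0, 31, 60, 91, 121, 152, 182, 213, 244, 274, 305, 335, 366]

def isLeapB (year : Int) : Bool :=
  PySem.Int.mod year 4 == 0 && (PySem.Int.mod year 100 != 0 || PySem.Int.mod year 400 == 0)

def daysOfMon_alt (year1 : Int) (month1 : Int) (day1 : Int) (year2 : Int) (month2 : Int) (day2 : Int) : Int :=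
  let p1 := if isLeapB year1 then prefixDaysLeap else prefixDays
  if year2 > year1 then
    let p2 := if isLeapB year2 then prefixDaysLeap else prefixDays
    (PySem.List.pyGetD p1 12 0 - PySem.List.pyGetD p1 month1 0) + PySem.List.pyGetD p2 (month2 - 1) 0
  else
    if month2 > month1 then
      PySem.List.pyGetD p1 (month2 - 1) 0 - PySem.List.pyGetD p1 month1 0
    else 0

-- ===== PRECONDITION & SPEC =====
-- Pre_ admits the natural domain (months in 1..12) plus the trivially-zero inputs
-- (year2 ≤ year1 and month2 ≤ month1, where neither program touches a table); it excludes
-- out-of-range months, where A's accidental empty ranges or Python's negative-index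
-- wraparound produce accidental values or IndexErrors outside the function's purpose.
def Pre_daysOfMon (year1 : Int) (month1 : Int) (day1 : Int) (year2 : Int) (month2 : Int) (day2 : Int) : Prop :=
  (1 ≤ month1 ∧ month1 ≤ 12 ∧ 1 ≤ month2 ∧ month2 ≤ 12) ∨ (year2 ≤ year1 ∧ month2 ≤ month1)
instance (year1 : Int) (month1 : Int) (day1 : Int) (year2 : Int) (month2 : Int) (day2 : Int) : Decidable (Pre_daysOfMon year1 month1 day1 year2 month2 day2) := by unfold Pre_daysOfMon; infer_instance

def pvWitness_daysOfMon : Int × Int × Int × Int × Int × Int := (2020, 3, 10, 2021, 2, 5)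

def Spec_daysOfMon (year1 : Int) (month1 : Int) (day1 : Int) (year2 : Int) (month2 : Int) (day2 : Int) (out : Int) : Prop := out = daysOfMon_alt year1 month1 day1 year2 month2 day2
instance (year1 : Int) (month1 : Int) (day1 : Int) (year2 : Int) (month2 : Int) (day2 : Int) (out : Int) : Decidable (Spec_daysOfMon year1 month1 day1 year2 month2 day2 out) := by unfold Spec_daysOfMon; infer_instance

-- ===== CLAIM (what is proved, stated in full; the proofs are below) =====
def Claim_equal_daysOfMon : Prop := ∀ (year1 : Int) (month1 : Int) (day1 : Int) (year2 : Int) (month2 : Int) (day2 : Int), Dom_daysOfMon year1 month1 day1 year2 month2 day2 → Pre_daysOfMon year1 month1 day1 year2 month2 day2 → Spec_daysOfMon year1 month1 day1 year2 month2 day2 (daysOfMon year1 month1 day1 year2 month2 day2)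

-- ===== LEMMAS AND PROOFS =====

-- A's isLeap and B's isLeap agree.
theorem isLeapB_eq (y : Int) : isLeapB y = isLeapA y := by
  unfold isLeapA isLeapB
  split_ifs with h1 h2 h3 <;> simp_all

-- A's loop body with the leap test abstracted to a Bool
def stepF (b : Bool) (mdays : Int) (i : Int) : Int :=
  mdays + (if b then PySem.List.pyGetD pyDaysOfMonthsLeap (i - 1) 0
           else PySem.List.pyGetD pyDaysOfMonths (i - 1) 0)

theorem monStepA_eq_stepF (y : Int) : monStepA y = stepF (isLeapA y) := by
  funext md i
  unfold monStepA stepF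
  cases h : isLeapA y <;> simp [h]

theorem stepF_shift (b : Bool) (l : List Int) (acc : Int) :
    l.foldl (stepF b) acc = acc + l.foldl (stepF b) 0 := by
  induction l generalizing acc with
  | nil => simp
  | cons a t ih =>
      simp only [List.foldl_cons]
      rw [ih (stepF b acc a), ih (stepF b 0 a)]
      unfold stepF
      ring

theorem fold_hi (b : Bool) (m : Int) (h1 : 1 ≤ m) (h2 : m ≤ 12) :
    (PySem.List.pyRange (m + 1) 13 1).foldl (stepF b) 0
      = PySem.List.pyGetD (if b then prefixDaysLeap else prefixDays) 12 0
        - PySem.List.pyGetD (if b then prefixDaysLeap else prefixDays) m 0 := by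
  cases b <;> interval_cases m <;> decide

theorem fold_lo (b : Bool) (m : Int) (h1 : 1 ≤ m) (h2 : m ≤ 12) :
    (PySem.List.pyRange 1 m 1).foldl (stepF b) 0
      = PySem.List.pyGetD (if b then prefixDaysLeap else prefixDays) (m - 1) 0 := by
  cases b <;> interval_cases m <;> decide

theorem fold_same (b : Bool) (m1 m2 : Int) (h1 : 1 ≤ m1) (h2 : m2 ≤ 12) (h3 : m1 < m2) :
    (PySem.List.pyRange (m1 + 1) m2 1).foldl (stepF b) 0
      = PySem.List.pyGetD (if b then prefixDaysLeap else prefixDays) (m2 - 1) 0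
        - PySem.List.pyGetD (if b then prefixDaysLeap else prefixDays) m1 0 := by
  have h4 : m1 ≤ 11 := by omega
  cases b <;> interval_cases m1 <;> interval_cases m2 <;> decide

-- ===== VERDICT (by name: the statement is the Claim_ definition above) =====
theorem daysOfMon_spec : Claim_equal_daysOfMon := by
  intro year1 month1 day1 year2 month2 day2 _ hpre
  unfold Spec_daysOfMon
  unfold daysOfMon daysOfMon_alt
  simp only [isLeapB_eq, monStepA_eq_stepF]
  rcases hpre with ⟨hm1a, hm1b, hm2a, hm2b⟩ | ⟨hy, hm⟩
  · by_cases hy : year2 > year1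
    · rw [if_pos hy, if_pos hy, stepF_shift,
          fold_hi (isLeapA year1) month1 hm1a hm1b,
          fold_lo (isLeapA year2) month2 hm2a hm2b]
    · rw [if_neg hy, if_neg hy]
      by_cases hm' : month2 > month1
      · rw [if_pos hm', if_pos hm',
            fold_same (isLeapA year1) month1 month2 hm1a hm2b hm']
      · rw [if_neg hm', if_neg hm']
  · rw [if_neg (by omega : ¬ year2 > year1), if_neg (by omega : ¬ year2 > year1),
        if_neg (by omega : ¬ month2 > month1), if_neg (by omega : ¬ month2 > month1)]
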